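-- pv_equiv track=rewrite | github.com/Chaehyunli/Algorithm | 프로그래머스/2/340212. ［PCCP 기출문제］ 2번 ／ 퍼즐 게임 챌린지/［PCCP 기출문제］ 2번 ／ 퍼즐 게임 챌린지.py | solution
-- ===== SOURCE A (Python) =====
-- def solve_time(diffs, times, level):
--     total_time = 0
--     for i in range(len(diffs)):
--         diff = diffs[i]
--         time_cur = times[i]
--         time_prev = times[i-1] if i > 0 else 0 # 이전 퍼즐 시간
--
--         if diff <= level:
--             # 숙련도가 충분하면 현재 퍼즐 시간만 소요
--             total_time += time_cur
--         else:
--             # 부족한 만큼 틀림: (현재+이전 시간) * 틀린 횟수 + 현재 시간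
--             mistakes = diff - level
--             total_time += mistakes * (time_cur + time_prev) + time_cur
--
--     return total_time
--
-- def solution(diffs, times, limit):
--     low = 1
--     high = max(diffs)
--     answer = high
--
--     while low <= high:
--         mid = (low + high) // 2
--         # mid 숙련도로 제한 시간 내에 풀 수 있는지 확인
--         if solve_time(diffs, times, mid) <= limit:
--             answer = mid  # 일단 기록하고, 더 낮은 숙련도가 있는지 확인
--             high = mid - 1
--         else:
--             low = mid + 1 # 시간이 초과되면 숙련도를 높여야 함
--
--     return answer
-- ===== SOURCE B (Python) =====
-- def solution(diffs, times, limit):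
--     # Same search, different cost machinery: sort puzzles by difficulty once and keep
--     # suffix sums, so each level's total time is a closed form found by bisection
--     # instead of a fresh scan over all puzzles.
--     hi0 = max(diffs)
--     if hi0 < 1:
--         return hi0
--     n = len(diffs)
--     base = sum(times[:n])
--     w = [times[i] + (times[i - 1] if i > 0 else 0) for i in range(n)]
--     order = sorted(zip(diffs, w), key=lambda p: p[0])
--     ds = [p[0] for p in order]
--     sufW = [0] * (n + 1)
--     sufT = [0] * (n + 1)
--     for k in reversed(range(n)):
--         sufW[k] = sufW[k + 1] + order[k][1]
--     for k in reversed(range(n)):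
--         sufT[k] = sufT[k + 1] + order[k][0] * order[k][1]
--
--     def total(level):
--         # index of the first difficulty > level (bisection on the sorted ds)
--         a, b = 0, n
--         while a < b:
--             m = (a + b) // 2
--             if ds[m] <= level:
--                 a = m + 1
--             else:
--                 b = m
--         return base + sufT[a] - level * sufW[a]
--
--     lo, hi = 1, hi0
--     while lo <= hi:
--         mid = (lo + hi) // 2
--         if total(mid) <= limit:
--             hi = mid - 1
--         else:
--             lo = mid + 1
--     return hi + 1 if hi < hi0 else hi0
-- ===== Notes on version B (the rewrite author's own statement) =====
-- stated objective: alternative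
-- what changed: The per-level cost is no longer recomputed by scanning every puzzle: B sorts the (difficulty, retry-weight) pairs once, precomputes suffix sums, and answers each level probe by bisection as base + sufT[k] - level*sufW[k] (identical totals, hence the identical search path); the outer loop also drops the answer accumulator, recovering the result from the final hi.
import Mathlib
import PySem

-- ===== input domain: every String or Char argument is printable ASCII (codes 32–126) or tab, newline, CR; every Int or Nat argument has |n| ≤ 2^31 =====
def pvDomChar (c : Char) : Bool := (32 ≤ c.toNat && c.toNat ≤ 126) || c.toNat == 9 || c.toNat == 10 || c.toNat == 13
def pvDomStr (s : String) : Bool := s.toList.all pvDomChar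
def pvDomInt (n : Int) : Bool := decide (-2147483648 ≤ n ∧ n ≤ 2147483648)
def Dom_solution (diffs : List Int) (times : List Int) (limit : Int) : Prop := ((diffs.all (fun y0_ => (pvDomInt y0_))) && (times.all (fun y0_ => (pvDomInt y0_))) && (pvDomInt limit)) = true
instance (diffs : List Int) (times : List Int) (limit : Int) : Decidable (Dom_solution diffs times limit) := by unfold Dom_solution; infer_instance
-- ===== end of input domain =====

-- B keeps A's level search but replaces the per-level scan of all puzzles by a
-- sort-once / suffix-sums / bisection cost oracle computing the same totals.

-- ===== PORT A =====
def solveTime (diffs : List Int) (times : List Int) (level : Int) : Int :=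
  (PySem.List.pyRange 0 diffs.length 1).foldl (fun total i =>
    let diff := PySem.List.pyGetD diffs i 0
    let timeCur := PySem.List.pyGetD times i 0
    let timePrev := if i > 0 then PySem.List.pyGetD times (i - 1) 0 else 0
    if diff ≤ level then total + timeCur
    else total + ((diff - level) * (timeCur + timePrev) + timeCur)) 0

def bsLoop (diffs : List Int) (times : List Int) (limit : Int) (fuel : Nat)
    (low high answer : Int) : Int :=
  match fuel with
  | 0 => answer  -- fuel only guards totality; solution always passes enough
  | fuel + 1 =>
    if low ≤ high then
      let mid := PySem.Int.floordiv (low + high) 2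
      if solveTime diffs times mid ≤ limit then
        bsLoop diffs times limit fuel low (mid - 1) mid
      else
        bsLoop diffs times limit fuel (mid + 1) high answer
    else answer

def solution (diffs : List Int) (times : List Int) (limit : Int) : Int :=
  let high := (PySem.List.max? diffs (fun x => x)).getD 0
  bsLoop diffs times limit (high + 1).toNat 1 high high

-- ===== PORT B =====
-- w[i] = times[i] + (times[i-1] if i > 0 else 0); getD is exact here: inside Pre_ every
-- index is in range (when max(diffs) < 1, B's Python never builds w either).
def wList (diffs : List Int) (times : List Int) : List Int :=
  (List.range diffs.length).map (fun i =>
    times.getD i 0 + if 0 < i then times.getD (i - 1) 0 else 0)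

def pairsB (diffs : List Int) (times : List Int) : List (Int × Int) :=
  diffs.zip (wList diffs times)

-- the two backward suffix-sum fills: sufSum order f = [sum of f over order[k:], k = 0..n]
def sufSum (order : List (Int × Int)) (f : Int × Int → Int) : List Int :=
  match order with
  | [] => [0]
  | p :: rest => (f p + (sufSum rest f).getD 0 0) :: sufSum rest f

-- the hand-written bisection: first index in sorted ds whose value exceeds level
def bisLoop (ds : List Int) (level : Int) (fuel : Nat) (a b : Nat) : Nat :=
  match fuel with
  | 0 => a  -- fuel only guards totality; totalB always passes enough
  | fuel + 1 =>
    if a < b then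
      let m := (a + b) / 2
      if ds.getD m 0 ≤ level then bisLoop ds level fuel (m + 1) b
      else bisLoop ds level fuel a m
    else a

def totalB (base : Int) (ds sufW sufT : List Int) (level : Int) : Int :=
  let a := bisLoop ds level ds.length 0 ds.length
  base + sufT.getD a 0 - level * sufW.getD a 0

def whileB (base : Int) (ds sufW sufT : List Int) (limit : Int) (fuel : Nat)
    (lo hi : Int) : Int :=
  match fuel with
  | 0 => hi  -- fuel only guards totality; solution_alt always passes enough
  | fuel + 1 =>
    if lo ≤ hi then
      let mid := PySem.Int.floordiv (lo + hi) 2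
      if totalB base ds sufW sufT mid ≤ limit then
        whileB base ds sufW sufT limit fuel lo (mid - 1)
      else whileB base ds sufW sufT limit fuel (mid + 1) hi
    else hi

def solution_alt (diffs : List Int) (times : List Int) (limit : Int) : Int :=
  let hi0 := (PySem.List.max? diffs (fun x => x)).getD 0
  if hi0 < 1 then hi0
  else
    let base := (times.take diffs.length).sum
    let order := PySem.List.sorted (pairsB diffs times) (fun p => p.1) false
    let ds := order.map (fun p => p.1)
    let sufW := sufSum order (fun p => p.2)
    let sufT := sufSum order (fun p => p.1 * p.2)
    let hi := whileB base ds sufW sufT limit (hi0 + 1).toNat 1 hi0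
    if hi < hi0 then hi + 1 else hi0

-- ===== PRECONDITION & SPEC =====
-- Pre_ excludes exactly the inputs where A raises: empty diffs (max raises ValueError) and
-- times shorter than diffs while some difficulty is ≥ 1 (solve_time raises IndexError).
def Pre_solution (diffs : List Int) (times : List Int) (limit : Int) : Prop :=
  diffs ≠ [] ∧
  (diffs.length ≤ times.length ∨ (PySem.List.max? diffs (fun x => x)).getD 0 < 1)
instance (diffs : List Int) (times : List Int) (limit : Int) : Decidable (Pre_solution diffs times limit) := by unfold Pre_solution; infer_instance

def pvWitness_solution : List Int × List Int × Int := ([3, 1, 4], [2, 5, 3], 20)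

def Spec_solution (diffs : List Int) (times : List Int) (limit : Int) (out : Int) : Prop := out = solution_alt diffs times limit
instance (diffs : List Int) (times : List Int) (limit : Int) (out : Int) : Decidable (Spec_solution diffs times limit out) := by unfold Spec_solution; infer_instance

-- ===== CLAIM (what is proved, stated in full; the proofs are below) =====
def Claim_equal_solution : Prop := ∀ (diffs : List Int) (times : List Int) (limit : Int), Dom_solution diffs times limit → Pre_solution diffs times limit → Spec_solution diffs times limit (solution diffs times limit)

-- ===== LEMMAS AND PROOFS =====

-- sums over the suffix where the difficulty exceeds u (proof-side views of B's arrays)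
def segW (pairs : List (Int × Int)) (u : Int) : Int :=
  ((pairs.filter (fun p => u < p.1)).map (fun p => p.2)).sum

def segT (pairs : List (Int × Int)) (u : Int) : Int :=
  ((pairs.filter (fun p => u < p.1)).map (fun p => p.1 * p.2)).sum

-- a single puzzle's time, branch form = max form
theorem term_eq (d tc tp level : Int) :
    (if d ≤ level then tc else (d - level) * (tc + tp) + tc)
      = tc + max (d - level) 0 * (tc + tp) := by
  by_cases hd : d ≤ level
  · rw [if_pos hd, max_eq_right (by omega)]; ring
  · rw [if_neg hd, max_eq_left (by omega)]; ring

-- A's loop as a sum over indices (no length hypothesis: both sides read with default 0)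
theorem solveTime_eq_sum (diffs times : List Int) (L : Int) :
    solveTime diffs times L
      = ((List.range diffs.length).map (fun k =>
          times.getD k 0 + max (diffs.getD k 0 - L) 0 *
            (times.getD k 0 + if 0 < k then times.getD (k - 1) 0 else 0))).sum := by
  unfold solveTime
  have hfun : (fun (total : Int) (i : Int) =>
      let diff := PySem.List.pyGetD diffs i 0
      let timeCur := PySem.List.pyGetD times i 0
      let timePrev := if i > 0 then PySem.List.pyGetD times (i - 1) 0 else 0
      if diff ≤ L then total + timeCur
      else total + ((diff - L) * (timeCur + timePrev) + timeCur))
    = (fun (total : Int) (i : Int) => total +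
        (if PySem.List.pyGetD diffs i 0 ≤ L then PySem.List.pyGetD times i 0
         else (PySem.List.pyGetD diffs i 0 - L) *
            (PySem.List.pyGetD times i 0 +
              (if i > 0 then PySem.List.pyGetD times (i - 1) 0 else 0)) +
            PySem.List.pyGetD times i 0)) := by
    funext total i
    dsimp only
    split_ifs <;> rfl
  rw [hfun, PySem.List.foldl_add, zero_add]
  rw [PySem.List.pyRange_one, List.map_map]
  congr 1
  apply List.ext_getElem
  · simp
  · intro k h1 h2
    simp only [List.getElem_map, Function.comp, List.getElem_range, zero_add, Int.sub_zero]
    rw [PySem.List.pyGetD_natCast, PySem.List.pyGetD_natCast]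
    cases k with
    | zero =>
      simp only [Nat.cast_zero]
      rw [if_neg (lt_irrefl (0 : Int)), if_neg (lt_irrefl 0)]
      simpa using term_eq (diffs.getD 0 0) (times.getD 0 0) 0 L
    | succ k =>
      have hpos : (0 : Int) < ((k + 1 : Nat) : Int) := by exact_mod_cast Nat.succ_pos k
      rw [if_pos hpos, if_pos (Nat.succ_pos k)]
      have hsub : ((k + 1 : Nat) : Int) - 1 = ((k : Nat) : Int) := by push_cast; ring
      rw [hsub, PySem.List.pyGetD_natCast]
      simpa using term_eq (diffs.getD (k+1) 0) (times.getD (k+1) 0) (times.getD k 0) L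

-- sum of per-index times = sum of the prefix
theorem sum_take (times : List Int) (n : Nat) (hlen : n ≤ times.length) :
    ((List.range n).map (fun k => times.getD k 0)).sum = (times.take n).sum := by
  congr 1
  apply List.ext_getElem
  · simp; omega
  · intro k h1 h2
    simp only [List.getElem_map, List.getElem_range, List.getElem_take]
    rw [List.getD_eq_getElem times 0 (by simp at h1; omega)]

theorem pairsB_eq (diffs times : List Int) :
    pairsB diffs times = (List.range diffs.length).map (fun k =>
      (diffs.getD k 0, times.getD k 0 + if 0 < k then times.getD (k - 1) 0 else 0)) := by
  unfold pairsB wList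
  apply List.ext_getElem
  · simp
  · intro k h1 h2
    simp only [List.getElem_zip, List.getElem_map, List.getElem_range]
    have hk : k < diffs.length := by simp at h1; omega
    rw [List.getD_eq_getElem diffs 0 hk]

theorem sum_map_add {α : Type} (l : List α) (f g : α → Int) :
    (l.map (fun x => f x + g x)).sum = (l.map f).sum + (l.map g).sum := by
  induction l with
  | nil => simp
  | cons x xs ih => simp [ih]; ring

-- the cost formula both programs are about
theorem solveTime_formula (diffs times : List Int) (L : Int)
    (hlen : diffs.length ≤ times.length) :
    solveTime diffs times L
      = (times.take diffs.length).sum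
        + ((pairsB diffs times).map (fun p => max (p.1 - L) 0 * p.2)).sum := by
  rw [solveTime_eq_sum, pairsB_eq, List.map_map]
  rw [sum_map_add (List.range diffs.length) (fun k => times.getD k 0)
      (fun k => max (diffs.getD k 0 - L) 0 *
        (times.getD k 0 + if 0 < k then times.getD (k - 1) 0 else 0))]
  rw [sum_take times diffs.length hlen]
  rfl

theorem seg_sum (ps : List (Int × Int)) (L u : Int)
    (h : ∀ p ∈ ps, (u < p.1 ↔ L < p.1)) :
    (ps.map (fun p => max (p.1 - L) 0 * p.2)).sum = segT ps u - L * segW ps u := by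
  induction ps with
  | nil => simp [segT, segW]
  | cons p ps ih =>
    have hp := h p (by simp)
    have ih' := ih (fun q hq => h q (by simp [hq]))
    unfold segT segW at *
    simp only [List.map_cons, List.sum_cons, List.filter_cons]
    by_cases hu : u < p.1
    · have hL : L < p.1 := hp.mp hu
      rw [if_pos (by simpa using hu)]
      simp only [List.map_cons, List.sum_cons]
      rw [max_eq_left (by omega), ih']; ring
    · have hL : ¬ L < p.1 := fun c => hu (hp.mpr c)
      rw [if_neg (by simpa using hu)]
      rw [max_eq_right (by omega), ih']; ring

-- the k-th entry of a suffix-sum array is the sum of f over the suffix from k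
theorem sufSum_getD (order : List (Int × Int)) (f : Int × Int → Int) (k : Nat)
    (hk : k ≤ order.length) :
    (sufSum order f).getD k 0 = ((order.drop k).map f).sum := by
  induction order generalizing k with
  | nil =>
    have : k = 0 := by simpa using hk
    subst this
    simp [sufSum]
  | cons p rest ih =>
    cases k with
    | zero =>
      show f p + (sufSum rest f).getD 0 0 = _
      rw [ih 0 (by omega)]
      simp
    | succ k =>
      show (sufSum rest f).getD k 0 = _
      rw [ih k (by simpa using hk)]
      simp

-- the bisection returns a split point: everything before it ≤ level, everything from it > level
theorem bisLoop_spec (ds : List Int) (level : Int)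
    (hsorted : ds.Pairwise (· ≤ ·))
    (fuel a b : Nat)
    (hfuel : b - a ≤ fuel) (hab : a ≤ b) (hbn : b ≤ ds.length)
    (ha : ∀ k, k < a → k < ds.length → ds.getD k 0 ≤ level)
    (hb : ∀ k, b ≤ k → k < ds.length → level < ds.getD k 0) :
    (bisLoop ds level fuel a b ≤ ds.length) ∧
    (∀ k, k < bisLoop ds level fuel a b → k < ds.length → ds.getD k 0 ≤ level) ∧
    (∀ k, bisLoop ds level fuel a b ≤ k → k < ds.length → level < ds.getD k 0) := by
  have hmono : ∀ i j, i ≤ j → j < ds.length → ds.getD i 0 ≤ ds.getD j 0 := by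
    intro i j hij hj
    rcases Nat.eq_or_lt_of_le hij with rfl | hlt
    · exact le_refl _
    · rw [List.getD_eq_getElem ds 0 (by omega), List.getD_eq_getElem ds 0 hj]
      exact List.pairwise_iff_getElem.mp hsorted i j (by omega) hj hlt
  induction fuel generalizing a b with
  | zero =>
    have : a = b := by omega
    subst this
    exact ⟨by simpa [bisLoop] using hbn, fun k h1 h2 => ha k (by simpa [bisLoop] using h1) h2,
      fun k h1 h2 => hb k (by simpa [bisLoop] using h1) h2⟩
  | succ fuel ih =>
    unfold bisLoop
    by_cases hlt : a < b
    · rw [if_pos hlt]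
      have hm1 : a ≤ (a + b) / 2 := by omega
      have hm2 : (a + b) / 2 < b := by omega
      by_cases hc : ds.getD ((a + b) / 2) 0 ≤ level
      · rw [if_pos hc]
        refine ih ((a + b) / 2 + 1) b (by omega) (by omega) hbn ?_ hb
        intro k hk hklen
        exact le_trans (hmono k ((a + b) / 2) (by omega) (by omega)) hc
      · rw [if_neg hc]
        refine ih a ((a + b) / 2) (by omega) (by omega) (by omega) ha ?_
        intro k hk hklen
        exact lt_of_lt_of_le (by omega) (hmono ((a + b) / 2) k hk hklen)
    · rw [if_neg hlt]
      exact ⟨by omega, fun k h1 h2 => ha k (by omega) h2, fun k h1 h2 => hb k (by omega) h2⟩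

-- dropping at the split point is filtering by "difficulty > level" (on the sorted list)
theorem drop_eq_filter (order : List (Int × Int)) (level : Int) (a : Nat)
    (han : a ≤ order.length)
    (h1 : ∀ k, (hk : k < order.length) → k < a → order[k].1 ≤ level)
    (h2 : ∀ k, (hk : k < order.length) → a ≤ k → level < order[k].1) :
    order.filter (fun p => level < p.1) = order.drop a := by
  conv_lhs => rw [← List.take_append_drop a order, List.filter_append]
  have htake : (order.take a).filter (fun p => level < p.1) = [] := by
    rw [List.filter_eq_nil_iff]
    intro p hp
    rw [List.mem_iff_getElem] at hp
    obtain ⟨i, hi, rfl⟩ := hp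
    have hi' : i < a := by simp at hi; omega
    rw [List.getElem_take]
    simpa using not_lt_of_ge (h1 i (by simp at hi; omega) hi')
  have hdrop : (order.drop a).filter (fun p => level < p.1) = order.drop a := by
    rw [List.filter_eq_self]
    intro p hp
    rw [List.mem_iff_getElem] at hp
    obtain ⟨i, hi, rfl⟩ := hp
    rw [List.getElem_drop]
    simpa using h2 (a + i) (by simp at hi; omega) (by omega)
  rw [htake, hdrop, List.nil_append]

-- B's oracle computes exactly A's per-level total
theorem totalB_eq (diffs times : List Int) (L : Int)
    (hlen : diffs.length ≤ times.length) :
    totalB (times.take diffs.length).sum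
      ((PySem.List.sorted (pairsB diffs times) (fun p => p.1) false).map (fun p => p.1))
      (sufSum (PySem.List.sorted (pairsB diffs times) (fun p => p.1) false) (fun p => p.2))
      (sufSum (PySem.List.sorted (pairsB diffs times) (fun p => p.1) false)
        (fun p => p.1 * p.2)) L
      = solveTime diffs times L := by
  set order := PySem.List.sorted (pairsB diffs times) (fun p => p.1) false with horder
  set ds := order.map (fun p => p.1) with hds
  have hlends : ds.length = order.length := by simp [hds]
  have hsorted : ds.Pairwise (· ≤ ·) := PySem.List.sorted_map_key_pairwise _ _
  obtain ⟨han, hbelow, habove⟩ := bisLoop_spec ds L hsorted ds.length 0 ds.length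
    (by omega) (by omega) le_rfl (by omega) (by omega)
  set a := bisLoop ds L ds.length 0 ds.length with ha
  have h1 : ∀ k, (hk : k < order.length) → k < a → order[k].1 ≤ L := by
    intro k hk hka
    have h := hbelow k hka (by omega)
    rw [List.getD_eq_getElem ds 0 (by omega)] at h
    simpa [hds] using h
  have h2 : ∀ k, (hk : k < order.length) → a ≤ k → L < order[k].1 := by
    intro k hk hka
    have h := habove k hka (by omega)
    rw [List.getD_eq_getElem ds 0 (by omega)] at h
    simpa [hds] using h
  have hfil := drop_eq_filter order L a (by omega) h1 h2
  have hperm : (order.filter (fun p => decide (L < p.1))).Perm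
      ((pairsB diffs times).filter (fun p => decide (L < p.1))) :=
    (PySem.List.sorted_perm _ _ _).filter _
  unfold totalB
  rw [← ha]
  show (times.take diffs.length).sum + (sufSum order (fun p => p.1 * p.2)).getD a 0
      - L * (sufSum order (fun p => p.2)).getD a 0 = solveTime diffs times L
  rw [sufSum_getD order (fun p => p.1 * p.2) a (by omega),
    sufSum_getD order (fun p => p.2) a (by omega), ← hfil]
  rw [solveTime_formula diffs times L hlen,
    seg_sum (pairsB diffs times) L L (fun p _ => Iff.rfl)]
  unfold segT segW
  rw [List.Perm.sum_eq (hperm.map _), List.Perm.sum_eq (hperm.map _)]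
  ring

-- the accumulator-free loop never increases hi
theorem whileB_le (base : Int) (ds sufW sufT : List Int) (limit : Int) (fuel : Nat)
    (lo hi : Int) : whileB base ds sufW sufT limit fuel lo hi ≤ hi := by
  induction fuel generalizing lo hi with
  | zero => exact le_refl hi
  | succ fuel ih =>
    simp only [whileB]
    split_ifs with h hc
    · have hb := PySem.Int.floordiv_two_mid_bounds h
      have := ih lo (PySem.Int.floordiv (lo + hi) 2 - 1)
      omega
    · exact ih _ hi
    · exact le_refl hi

-- A's search loop, expressed through B's accumulator-free loop (any fuel)
theorem bsLoop_eq (diffs times : List Int) (limit base : Int) (ds sufW sufT : List Int)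
    (htot : ∀ L, totalB base ds sufW sufT L = solveTime diffs times L)
    (fuel : Nat) (lo hi ans : Int) :
    bsLoop diffs times limit fuel lo hi ans =
      if whileB base ds sufW sufT limit fuel lo hi < hi
      then whileB base ds sufW sufT limit fuel lo hi + 1 else ans := by
  induction fuel generalizing lo hi ans with
  | zero => simp [bsLoop, whileB]
  | succ fuel ih =>
    simp only [bsLoop, whileB]
    by_cases h : lo ≤ hi
    · rw [if_pos h, if_pos h]
      have hb := PySem.Int.floordiv_two_mid_bounds h
      rw [← htot]
      by_cases hc : totalB base ds sufW sufT (PySem.Int.floordiv (lo + hi) 2) ≤ limit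
      · rw [if_pos hc, if_pos hc, ih]
        have hle := whileB_le base ds sufW sufT limit fuel lo (PySem.Int.floordiv (lo + hi) 2 - 1)
        split_ifs <;> omega
      · rw [if_neg hc, if_neg hc, ih]
    · rw [if_neg h, if_neg h, if_neg (lt_irrefl hi)]

-- A returns max(diffs) immediately when it is < 1 (the loop body never runs)
theorem bsLoop_trivial (diffs times : List Int) (limit h0 : Int) (f : Nat) (hlt : h0 < 1) :
    bsLoop diffs times limit f 1 h0 h0 = h0 := by
  cases f with
  | zero => rfl
  | succ f => unfold bsLoop; rw [if_neg (by omega)]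

-- ===== VERDICT (by name: the statement is the Claim_ definition above) =====
theorem solution_spec : Claim_equal_solution := by
  intro diffs times limit _hdom hpre
  unfold Spec_solution
  obtain ⟨hne, hdisj⟩ := hpre
  simp only [solution, solution_alt]
  by_cases hlt : (PySem.List.max? diffs (fun x => x)).getD 0 < 1
  · rw [if_pos hlt]
    exact bsLoop_trivial diffs times limit _ _ hlt
  · rw [if_neg hlt]
    have hlen : diffs.length ≤ times.length := by
      rcases hdisj with h | h
      · exact h
      · exact absurd h hlt
    rw [bsLoop_eq diffs times limit _ _ _ _ (fun L => totalB_eq diffs times L hlen)]
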